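-- pv_equiv track=rewrite | github.com/miliar/Code_Jam_Webscraper | solutions_python/Problem_55/159.py | ride
-- ===== SOURCE A (Python) =====
-- def ride(k,g,offset):
--   money=0
--   x = k
--   riders =0
--   while(x >= g[offset] and riders<len(g)):
--     x -=g[offset]
--     money+=g[offset]
--     riders+=1
--     offset+=1
--     offset%=len(g)
--   return [money,offset]
-- ===== SOURCE B (Python) =====
-- def ride(k, g, offset):
--     # Staged re-implementation: materialize the circular prefix sums once,
--     # then locate the stopping point in that table (instead of A's fused
--     # greedy while-loop that re-indexes and re-mods on every step).
--     n = len(g)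
--     if g[offset] > k:          # raises IndexError exactly where A does
--         return [0, offset]
--     # pass 1: prefix[i] = total size of the first i groups counted circularly from offset
--     prefix = [0]
--     total = 0
--     for i in range(n):
--         total += g[(offset + i) % n]
--         prefix.append(total)
--     # pass 2: the ride stops before the first prefix step that overflows k;
--     # default: everyone (all n groups) boards
--     c, money = n, total
--     for j, (p, s) in enumerate(zip(prefix, prefix[1:])):
--         if s > k:
--             c, money = j, p
--             break
--     return [money, (offset + c) % n]
-- ===== Notes on version B (the rewrite author's own statement) =====
-- stated objective: alternative
-- what changed: Replaces A's fused greedy while-loop (per-step affordability test, modular index stepping, four mutating state variables) by two staged passes: first materialize the full table of circular prefix sums from offset, then locate the stopping point as the first table step exceeding k and read money and final offset off the table in closed form.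
import Mathlib
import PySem

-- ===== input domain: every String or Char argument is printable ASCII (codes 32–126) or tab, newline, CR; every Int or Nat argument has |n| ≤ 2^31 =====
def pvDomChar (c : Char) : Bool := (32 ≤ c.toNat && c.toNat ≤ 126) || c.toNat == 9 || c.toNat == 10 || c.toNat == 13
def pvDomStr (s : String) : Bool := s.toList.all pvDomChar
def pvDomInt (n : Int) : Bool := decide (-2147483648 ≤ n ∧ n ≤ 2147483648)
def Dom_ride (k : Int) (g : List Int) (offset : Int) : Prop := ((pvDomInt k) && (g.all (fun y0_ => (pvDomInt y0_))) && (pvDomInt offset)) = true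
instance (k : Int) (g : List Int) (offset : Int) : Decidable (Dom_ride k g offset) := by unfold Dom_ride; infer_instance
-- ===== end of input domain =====

-- B replaces A's fused greedy while-loop by two staged passes: build the circular
-- prefix-sum table once, then find the stopping step in that table; return-value
-- equivalence on Pre_ (non-empty g, in-range offset).

-- ===== PORT A =====
-- fuel = len(g) - riders: the loop condition 'riders < len(g)' bounds the iterations.
def rideLoop (g : List Int) : Nat → Int → Int → Int → List Int
  | 0, money, _, offset => [money, offset]
  | fuel+1, money, x, offset =>
    (PySem.List.pyGet? g offset).elim [money, offset] (fun gi =>   -- none = IndexError; excluded by Pre_ride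
      if gi ≤ x then
        rideLoop g fuel (money + gi) (x - gi) (PySem.Int.mod (offset + 1) g.length)
      else [money, offset])

def ride (k : Int) (g : List Int) (offset : Int) : List Int :=
  rideLoop g g.length 0 k offset

-- ===== PORT B =====
-- pass 2 of Source B: the for-loop with break over enumerate(zip(prefix, prefix[1:])),
-- starting from the defaults (c, money) = (n, total)
def cutScan (k : Int) (n : Int) (total : Int) : Int → List (Int × Int) → Int × Int
  | _, [] => (n, total)
  | j, (p, s) :: rest => if s > k then (j, p) else cutScan k n total (j + 1) rest

-- the body of Source B's pass-1 loop: extend the prefix table and the running total by one group;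
-- the index (offset + i) % n is always in range, so the pyGetD default is never used
def buildStep (g : List Int) (offset : Int) (pt : List Int × Int) (i : Int) : List Int × Int :=
  let total := pt.2 + PySem.List.pyGetD g (PySem.Int.mod (offset + i) (g.length : Int)) 0
  (pt.1 ++ [total], total)

def ride_alt (k : Int) (g : List Int) (offset : Int) : List Int :=
  (PySem.List.pyGet? g offset).elim [0, offset] (fun g0 =>   -- none = IndexError; excluded by Pre_ride
    if g0 > k then [0, offset]
    else
      let pt := (PySem.List.pyRange 0 (g.length : Int) 1).foldl (buildStep g offset) ([0], 0)
      let cm := cutScan k (g.length : Int) pt.2 0 (pt.1.zip (PySem.List.slice pt.1 (some 1) none))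
      [cm.2, PySem.Int.mod (offset + cm.1) (g.length : Int)])

-- ===== PRECONDITION & SPEC =====
-- Pre_ excludes exactly the inputs where A raises IndexError: empty g, or offset out of Python's index range.
def Pre_ride (k : Int) (g : List Int) (offset : Int) : Prop :=
  g ≠ [] ∧ -(g.length : Int) ≤ offset ∧ offset < g.length
instance (k : Int) (g : List Int) (offset : Int) : Decidable (Pre_ride k g offset) := by unfold Pre_ride; infer_instance
def pvWitness_ride : Int × List Int × Int := (10, [3, 1], 0)

def Spec_ride (k : Int) (g : List Int) (offset : Int) (out : List Int) : Prop := out = ride_alt k g offset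
instance (k : Int) (g : List Int) (offset : Int) (out : List Int) : Decidable (Spec_ride k g offset out) := by unfold Spec_ride; infer_instance

-- ===== CLAIM (what is proved, stated in full; the proofs are below) =====
def Claim_equal_ride : Prop := ∀ (k : Int) (g : List Int) (offset : Int), Dom_ride k g offset → Pre_ride k g offset → Spec_ride k g offset (ride k g offset)

-- ===== LEMMAS AND PROOFS =====

-- the prefix-sum function of the rotated queue: pfxS rot i = total size of the first i rotated groups
def pfxS (rot : List Int) (i : Nat) : Int := (rot.take i).sum

-- rotation indexing: element i of (g.drop m ++ g.take m) is g[(m+i) % n]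
lemma rot_getElem? (g : List Int) (m i : Nat) (hm : m ≤ g.length) (hi : i < g.length) :
    (g.drop m ++ g.take m)[i]? = g[(m + i) % g.length]? := by
  by_cases h : m + i < g.length
  · rw [List.getElem?_append_left (by simp [List.length_drop]; omega), List.getElem?_drop]
    congr 1
    exact (Nat.mod_eq_of_lt h).symm
  · rw [List.getElem?_append_right (by simp [List.length_drop]; omega), List.getElem?_take]
    rw [if_pos (by simp [List.length_drop]; omega)]
    congr 1
    rw [Nat.mod_eq_sub_mod (by omega), Nat.mod_eq_of_lt (by omega)]
    simp [List.length_drop]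
    omega

lemma rot_length (g : List Int) (m : Nat) (hm : m ≤ g.length) :
    (g.drop m ++ g.take m).length = g.length := by
  simp
  omega

-- shifting a residue: if offset ≡ m (mod n) then (offset + c) % n = (m + c) % n
lemma residue_shift (offset c : Int) (n m : Nat) (hn : 0 < n) (hco : offset % (n : Int) = (m : Int)) :
    (offset + c) % (n : Int) = ((m : Int) + c) % (n : Int) := by
  have hd := Int.ediv_add_emod offset (n : Int)
  rw [hco] at hd
  have h : offset + c = ((m : Int) + c) + (n : Int) * (offset / (n : Int)) := by omega
  rw [h, Int.add_mul_emod_self_left]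

-- pass 1 of B builds exactly the prefix-sum table of the rotation, paired with the running total
lemma build_prefix (g : List Int) (offset : Int) (m : Nat) (hm : m < g.length)
    (hco : offset % ((g.length : Nat) : Int) = (m : Int)) (t : Nat) (ht : t ≤ g.length) :
    (PySem.List.pyRange 0 (t : Int) 1).foldl (buildStep g offset) ([0], 0) =
      ((List.range (t + 1)).map (fun i => pfxS (g.drop m ++ g.take m) i),
        pfxS (g.drop m ++ g.take m) t) := by
  have hn : 0 < g.length := by omega
  have hnI : (0 : Int) < (g.length : Int) := by exact_mod_cast hn
  induction t with
  | zero =>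
    rw [PySem.List.pyRange_one_eq_nil (by omega)]
    simp [pfxS]
  | succ t ih =>
    have ht' : t ≤ g.length := by omega
    have hcast : (((t + 1 : Nat) : Int)) = (t : Int) + 1 := by push_cast; ring
    rw [hcast, PySem.List.pyRange_one_succ_right (by exact_mod_cast Int.natCast_nonneg t),
      List.foldl_append, ih ht']
    have hres : PySem.Int.mod (offset + (t : Int)) (g.length : Int) = (((m + t) % g.length : Nat) : Int) := by
      rw [PySem.Int.mod_eq_emod_of_pos hnI, residue_shift offset (t : Int) g.length m hn hco]
      push_cast
      ring_nf
    have hlt : (m + t) % g.length < g.length := Nat.mod_lt _ hn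
    have hrotlen : (g.drop m ++ g.take m).length = g.length := rot_length g m (le_of_lt hm)
    have htlt : t < (g.drop m ++ g.take m).length := by omega
    have hrot : g[(m + t) % g.length] = (g.drop m ++ g.take m)[t] := by
      have h := rot_getElem? g m t (le_of_lt hm) (by omega)
      rw [List.getElem?_eq_getElem htlt, List.getElem?_eq_getElem hlt] at h
      exact (Option.some.inj h).symm
    have hget : PySem.List.pyGetD g (PySem.Int.mod (offset + (t : Int)) (g.length : Int)) 0
        = (g.drop m ++ g.take m)[t] := by
      rw [hres, PySem.List.pyGetD_natCast, List.getD_eq_getElem g 0 hlt, hrot]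
    have hsum : pfxS (g.drop m ++ g.take m) t + (g.drop m ++ g.take m)[t]
        = pfxS (g.drop m ++ g.take m) (t + 1) := (List.sum_take_succ _ t htlt).symm
    simp only [List.foldl_cons, List.foldl_nil, buildStep, hget, hsum]
    congr 1
    conv_rhs => rw [List.range_succ]
    rw [List.map_append, List.map_cons, List.map_nil]

-- main invariant: after i ≥ 1 boardings, A's remaining loop equals B's cut-scan from pair index i
lemma loop_eq (g : List Int) (k : Int) (m : Nat) (hm : m < g.length)
    (P : List Int) (hP : P = (List.range (g.length + 1)).map (fun i => pfxS (g.drop m ++ g.take m) i)) :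
    ∀ (f i : Nat), 1 ≤ i → i ≤ g.length → f = g.length - i →
      rideLoop g f (pfxS (g.drop m ++ g.take m) i) (k - pfxS (g.drop m ++ g.take m) i)
          (((m : Int) + (i : Int)) % (g.length : Int)) =
        [(cutScan k (g.length : Int) (pfxS (g.drop m ++ g.take m) g.length) (i : Int)
            ((P.zip (P.drop 1)).drop i)).2,
          ((m : Int) + (cutScan k (g.length : Int) (pfxS (g.drop m ++ g.take m) g.length) (i : Int)
            ((P.zip (P.drop 1)).drop i)).1) % (g.length : Int)] := by
  have hn : 0 < g.length := by omega
  have hnI : (0 : Int) < (g.length : Int) := by exact_mod_cast hn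
  subst hP
  have hpairlen : ((((List.range (g.length + 1)).map (fun i => pfxS (g.drop m ++ g.take m) i)).zip
      (((List.range (g.length + 1)).map (fun i => pfxS (g.drop m ++ g.take m) i)).drop 1))).length
      = g.length := by
    rw [List.length_zip, List.length_drop]
    simp
  intro f
  induction f with
  | zero =>
    intro i h1 h2 hf
    have hi : i = g.length := by omega
    subst hi
    rw [List.drop_eq_nil_of_le (le_of_eq hpairlen)]
    simp only [rideLoop, cutScan]
  | succ f ih =>
    intro i h1 h2 hf
    have hi : i < g.length := by omega
    have hlt : (m + i) % g.length < g.length := Nat.mod_lt _ hn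
    have hrotlen : (g.drop m ++ g.take m).length = g.length := rot_length g m (le_of_lt hm)
    have hilt : i < (g.drop m ++ g.take m).length := by omega
    have hrot : g[(m + i) % g.length] = (g.drop m ++ g.take m)[i] := by
      have h := rot_getElem? g m i (le_of_lt hm) (by omega)
      rw [List.getElem?_eq_getElem hilt, List.getElem?_eq_getElem hlt] at h
      exact (Option.some.inj h).symm
    have hjcast : ((m : Int) + (i : Int)) % (g.length : Int) = (((m + i) % g.length : Nat) : Int) := by
      push_cast
      ring_nf
    have hget : PySem.List.pyGet? g (((m : Int) + (i : Int)) % (g.length : Int))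
        = some ((g.drop m ++ g.take m)[i]) := by
      rw [hjcast, PySem.List.pyGet?_natCast, List.getElem?_eq_getElem hlt, hrot]
    set P := (List.range (g.length + 1)).map (fun i => pfxS (g.drop m ++ g.take m) i) with hPdef
    have hipair : i < (P.zip (P.drop 1)).length := by omega
    have hpair : (P.zip (P.drop 1))[i]'hipair
        = (pfxS (g.drop m ++ g.take m) i, pfxS (g.drop m ++ g.take m) (i + 1)) := by
      simp [hPdef, List.getElem_zip]
    have hdrop : (P.zip (P.drop 1)).drop i
        = (pfxS (g.drop m ++ g.take m) i, pfxS (g.drop m ++ g.take m) (i + 1))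
            :: (P.zip (P.drop 1)).drop (i + 1) := by
      rw [← List.getElem_cons_drop hipair, hpair]
    have hsum : pfxS (g.drop m ++ g.take m) (i + 1)
        = pfxS (g.drop m ++ g.take m) i + (g.drop m ++ g.take m)[i] := List.sum_take_succ _ i hilt
    rw [hdrop]
    simp only [rideLoop, hget, Option.elim, cutScan]
    by_cases hb : pfxS (g.drop m ++ g.take m) (i + 1) > k
    · rw [if_neg (by omega), if_pos hb]
    · rw [if_pos (by omega), if_neg hb]
      have hmod : PySem.Int.mod (((m : Int) + (i : Int)) % (g.length : Int) + 1) ((g.length : Nat) : Int)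
          = ((m : Int) + ((i + 1 : Nat) : Int)) % (g.length : Int) := by
        rw [PySem.Int.mod_eq_emod_of_pos hnI, Int.emod_add_emod]
        push_cast
        ring_nf
      have hmoney : pfxS (g.drop m ++ g.take m) i + (g.drop m ++ g.take m)[i]
          = pfxS (g.drop m ++ g.take m) (i + 1) := hsum.symm
      have hx : k - pfxS (g.drop m ++ g.take m) i - (g.drop m ++ g.take m)[i]
          = k - pfxS (g.drop m ++ g.take m) (i + 1) := by omega
      rw [hmod, hmoney, hx]
      have hih := ih (i + 1) (by omega) (by omega) (by omega)
      push_cast at hih ⊢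
      exact hih

-- offset normalisation under Pre_: the canonical residue m with pyGet? g offset = g[m]
lemma offset_residue (g : List Int) (offset : Int) (hne : g ≠ [])
    (h1 : -(g.length : Int) ≤ offset) (h2 : offset < g.length) :
    ∃ m : Nat, m < g.length ∧
      offset % ((g.length : Nat) : Int) = (m : Int) ∧
      PySem.List.pyGet? g offset = g[m]? := by
  have hn : 0 < g.length := List.length_pos_of_ne_nil hne
  by_cases hpos : 0 ≤ offset
  · refine ⟨offset.toNat, by omega, ?_, ?_⟩
    · rw [Int.emod_eq_of_lt hpos (by exact_mod_cast h2)]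
      omega
    · rw [PySem.List.pyGet?_of_nonneg g hpos]
  · obtain ⟨K, hK⟩ : ∃ K : Nat, offset = -(K : Int) := ⟨(-offset).toNat, by omega⟩
    have hk : 0 < K := by omega
    have hk2 : K ≤ g.length := by omega
    refine ⟨g.length - K, by omega, ?_, ?_⟩
    · have e1 : (offset + (g.length : Int) * 1) % (g.length : Int) = offset % (g.length : Int) := by
        rw [Int.add_mul_emod_self_left]
      have e2 : offset + (g.length : Int) * 1 = offset + (g.length : Int) := by ring
      have e3 : (offset + (g.length : Int)) % (g.length : Int) = offset + (g.length : Int) :=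
        Int.emod_eq_of_lt (by omega) (by omega)
      rw [← e1, e2, e3]
      omega
    · rw [hK, PySem.List.pyGet?_neg_natCast g K hk hk2]

-- ===== VERDICT (by name: the statement is the Claim_ definition above) =====
theorem ride_spec : Claim_equal_ride := by
  intro k g offset _ hpre
  obtain ⟨hne, h1, h2⟩ := hpre
  obtain ⟨m, hm, hco, hget⟩ := offset_residue g offset hne h1 h2
  have hn : 0 < g.length := List.length_pos_of_ne_nil hne
  rw [List.getElem?_eq_getElem hm] at hget
  have hnI : (0 : Int) < (g.length : Int) := by exact_mod_cast hn
  unfold Spec_ride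
  simp only [ride, ride_alt, hget, Option.elim]
  set rot := g.drop m ++ g.take m with hrotdef
  have hrotlen : rot.length = g.length := rot_length g m (le_of_lt hm)
  have hS1 : pfxS rot 1 = g[m]'(by omega) := by
    have h0 : 0 < rot.length := by omega
    have hrot0 : rot[0]'h0 = g[m]'(by omega) := by
      have h := rot_getElem? g m 0 (le_of_lt hm) hn
      rw [List.getElem?_eq_getElem h0, Nat.add_zero, Nat.mod_eq_of_lt hm,
        List.getElem?_eq_getElem (by omega)] at h
      exact Option.some.inj h
    have := List.sum_take_succ rot 0 h0
    simpa [pfxS, hrot0] using this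
  by_cases hb : g[m]'(by omega) > k
  · rw [if_pos hb]
    obtain ⟨fuel, hfuel⟩ : ∃ f, g.length = f + 1 := ⟨g.length - 1, by omega⟩
    rw [hfuel]
    simp only [rideLoop, hget, Option.elim]
    rw [if_neg (by omega)]
  · rw [if_neg hb]
    have hbuild := build_prefix g offset m hm hco g.length (le_refl _)
    simp only [hbuild]
    set P := (List.range (g.length + 1)).map (fun i => pfxS rot i) with hPdef
    have hPlen : P.length = g.length + 1 := by rw [hPdef]; simp
    have hslice : PySem.List.slice P (some 1) none = P.drop 1 := by
      rw [PySem.List.slice_from P (by norm_num)]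
      rfl
    have hpairlen : (P.zip (P.drop 1)).length = g.length := by
      rw [List.length_zip, hPlen, List.length_drop]
      omega
    have hPel : ∀ (j : Nat) (hj : j < P.length), P[j] = pfxS rot j := by
      intro j hj
      simp [hPdef]
    have h0pair : 0 < (P.zip (P.drop 1)).length := by omega
    have hpair0 : (P.zip (P.drop 1))[0]'h0pair = (pfxS rot 0, pfxS rot 1) := by
      rw [List.getElem_zip]
      have hd : (P.drop 1)[0]'(by rw [List.length_drop]; omega) = P[1 + 0]'(by rw [hPlen]; omega) :=
        List.getElem_drop
      rw [hPel 0 (by omega), hd, hPel (1 + 0) (by rw [hPlen]; omega)]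
    have hunroll : P.zip (P.drop 1) = (pfxS rot 0, pfxS rot 1) :: (P.zip (P.drop 1)).drop 1 := by
      have h00 := List.getElem_cons_drop h0pair
      simp only [List.drop_zero, Nat.zero_add] at h00
      conv_lhs => rw [← h00]
      rw [hpair0]
    obtain ⟨fuel, hfuel⟩ : ∃ f, g.length = f + 1 := ⟨g.length - 1, by omega⟩
    conv_lhs => rw [hfuel]
    simp only [rideLoop, hget, Option.elim]
    rw [if_pos (by omega)]
    rw [hslice, hunroll]
    simp only [cutScan]
    rw [if_neg (by rw [hS1]; omega)]
    rw [show (0 : Int) + 1 = 1 from by norm_num]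
    have hmod1 : PySem.Int.mod (offset + 1) ((g.length : Nat) : Int)
        = ((m : Int) + 1) % (g.length : Int) := by
      rw [PySem.Int.mod_eq_emod_of_pos hnI, residue_shift offset 1 g.length m hn hco]
    have hmoney : (0 : Int) + g[m]'(by omega) = pfxS rot 1 := by rw [hS1]; ring
    have hx : k - g[m]'(by omega) = k - pfxS rot 1 := by rw [hS1]
    rw [hmod1, hmoney, hx]
    have hmain := loop_eq g k m hm P hPdef fuel 1 (le_refl 1) (by omega) (by omega)
    push_cast at hmain
    rw [hmain]
    set cm := cutScan k ((g.length : Nat) : Int) (pfxS rot g.length) 1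
      ((P.zip (P.drop 1)).drop 1) with hcm
    have hmodc : PySem.Int.mod (offset + cm.1) ((g.length : Nat) : Int)
        = ((m : Int) + cm.1) % (g.length : Int) := by
      rw [PySem.Int.mod_eq_emod_of_pos hnI, residue_shift offset cm.1 g.length m hn hco]
    rw [hmodc]
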